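-- pv_equiv track=rewrite | github.com/Parag2367/pythonLearn | Learn/Revision_dsa_sorting.py | superior
-- ===== SOURCE A (Python) =====
-- def superior(nums: list):
--     n = len(nums)
--     maxi = float("-inf")
--     result = []
--
--     for i in range(n - 1, -1, -1):
--         if nums[i] > maxi:
--             result.append(nums[i])
--             maxi = nums[i]
--
--     return result
-- ===== SOURCE B (Python) =====
-- def superior(nums: list):
--     # Pass 1: build suffix-max table over the reversed list (None = no element to the right).
--     suf = []
--     m = None
--     for x in reversed(nums):
--         suf.append(m)
--         m = x if m is None or x > m else m
--     # Pass 2: keep, right to left, the elements strictly greater than their suffix max.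
--     return [x for x, s in zip(reversed(nums), suf) if s is None or x > s]
-- ===== Notes on version B (the rewrite author's own statement) =====
-- stated objective: alternative
-- what changed: Replaces the single running-max-with-collect loop by an explicit two-pass scheme: first build a suffix-maximum table (over the reversed list), then filter the reversed list against that table.
import Mathlib
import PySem

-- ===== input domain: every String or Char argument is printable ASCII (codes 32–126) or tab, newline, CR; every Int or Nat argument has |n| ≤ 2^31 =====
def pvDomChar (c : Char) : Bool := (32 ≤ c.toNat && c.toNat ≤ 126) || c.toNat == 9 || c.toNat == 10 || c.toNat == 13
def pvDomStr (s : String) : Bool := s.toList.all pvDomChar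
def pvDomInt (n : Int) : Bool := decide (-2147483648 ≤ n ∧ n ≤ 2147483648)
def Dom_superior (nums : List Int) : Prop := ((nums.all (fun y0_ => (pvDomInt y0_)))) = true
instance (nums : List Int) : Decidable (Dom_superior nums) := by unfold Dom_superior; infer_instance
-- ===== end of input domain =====

-- B keeps A's right-to-left output order and strict '>' but splits the work into an explicit
-- suffix-max table pass plus a filtering pass (objective: alternative decomposition, same cost).

-- 'x > m' where m is the running maximum, with none standing for Python's float('-inf')/None
def pvGt (x : Int) (m : Option Int) : Bool :=
  match m with
  | none => true
  | some v => decide (v < x)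

-- ===== PORT A =====
def superior (nums : List Int) : List Int :=
  ((PySem.List.pyRange (PySem.List.len nums - 1) (-1) (-1)).foldl
    (fun (st : Option Int × List Int) i =>
      if pvGt (PySem.List.pyGetD nums i 0) st.1
      then (some (PySem.List.pyGetD nums i 0), st.2 ++ [PySem.List.pyGetD nums i 0]) else st)
    (none, [])).2

-- ===== PORT B =====
def superior_alt (nums : List Int) : List Int :=
  -- pass 1: suffix-max table over the reversed list
  -- (pass 2 below filters the reversed list against the table)
  ((nums.reverse.zip
      (nums.reverse.foldl
        (fun (st : List (Option Int) × Option Int) x =>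
          (st.1 ++ [st.2], if pvGt x st.2 then some x else st.2))
        ([], none)).1).filter (fun p => pvGt p.1 p.2)).map (·.1)

-- ===== PRECONDITION & SPEC =====
def Spec_superior (nums : List Int) (out : List Int) : Prop := out = superior_alt nums
instance (nums : List Int) (out : List Int) : Decidable (Spec_superior nums out) := by unfold Spec_superior; infer_instance

-- ===== CLAIM (what is proved, stated in full; the proofs are below) =====
def Claim_equal_superior : Prop := ∀ (nums : List Int), Dom_superior nums → Spec_superior nums (superior nums)

-- ===== LEMMAS AND PROOFS =====

/-- The suffix table B builds, as a structural recursion (proof device). -/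
def sufFrom : List Int → Option Int → List (Option Int)
  | [], _ => []
  | x :: xs, m => m :: sufFrom xs (if pvGt x m then some x else m)

lemma suf_fold_eq (l : List Int) (s : List (Option Int)) (m : Option Int) :
    (l.foldl (fun (st : List (Option Int) × Option Int) x =>
        (st.1 ++ [st.2], if pvGt x st.2 then some x else st.2)) (s, m)).1
      = s ++ sufFrom l m := by
  induction l generalizing s m with
  | nil => simp [sufFrom]
  | cons x xs ih => simp [List.foldl, sufFrom, ih]

lemma key (l : List Int) (m : Option Int) (res : List Int) :
    (l.foldl (fun (st : Option Int × List Int) x =>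
        if pvGt x st.1 then (some x, st.2 ++ [x]) else st) (m, res)).2
      = res ++ ((l.zip (sufFrom l m)).filter (fun p => pvGt p.1 p.2)).map (·.1) := by
  induction l generalizing m res with
  | nil => simp [sufFrom]
  | cons x xs ih =>
    by_cases h : pvGt x m = true
    · simp [List.foldl, sufFrom, h, ih]
    · simp [List.foldl, sufFrom, h, ih]

lemma A_eq_fold (nums : List Int) :
    superior nums
      = (nums.reverse.foldl (fun (st : Option Int × List Int) x =>
          if pvGt x st.1 then (some x, st.2 ++ [x]) else st) (none, [])).2 := by
  unfold superior
  have hr : PySem.List.pyRange ((PySem.List.len nums) - 1) (-1) (-1)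
      = (PySem.List.pyRange 0 (PySem.List.len nums) 1).reverse := by
    rw [PySem.List.pyRange_neg_one_eq_reverse]; norm_num
  rw [hr]
  refine congrArg Prod.snd ?_
  have hm : (PySem.List.pyRange 0 (PySem.List.len nums) 1).map
      (fun j => PySem.List.pyGetD nums j 0) = nums := by
    simpa using PySem.List.map_pyGetD_pyRange_zero' nums 0
  calc (PySem.List.pyRange 0 (PySem.List.len nums) 1).reverse.foldl
        (fun (st : Option Int × List Int) i =>
          if pvGt (PySem.List.pyGetD nums i 0) st.1
          then (some (PySem.List.pyGetD nums i 0), st.2 ++ [PySem.List.pyGetD nums i 0]) else st)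
        (none, [])
      = (((PySem.List.pyRange 0 (PySem.List.len nums) 1).map
          (fun j => PySem.List.pyGetD nums j 0)).reverse).foldl
          (fun (st : Option Int × List Int) x =>
            if pvGt x st.1 then (some x, st.2 ++ [x]) else st) (none, []) := by
        simp only [List.foldl_reverse, List.foldr_map]
    _ = nums.reverse.foldl (fun (st : Option Int × List Int) x =>
          if pvGt x st.1 then (some x, st.2 ++ [x]) else st) (none, []) := by rw [hm]

-- ===== VERDICT (by name: the statement is the Claim_ definition above) =====
theorem superior_spec : Claim_equal_superior := by
  intro nums _
  unfold Spec_superior superior_alt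
  rw [A_eq_fold, key, suf_fold_eq]
  simp
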